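-- pv_equiv track=rewrite | github.com/patrick-armitage/checkio | the-longest-palindromic.py | check_snakeeyes_palindrome
-- ===== SOURCE A (Python) =====
-- def check_snakeeyes_palindrome(text):
--     palindrome = ''
--     palindromes = []
--     length = len(text)
--     text = list(text)
--
--     for i, ch in enumerate(text):
--         if (i+1) < length:
--             j = i
--             k = i + 1
--             while (j >= 0) and (k < length) and text[j] == text[k]:
--                 palindrome = text[j] + palindrome + text[k]
--                 j -= 1
--                 k += 1
--         if len(palindrome) > 0:
--             palindromes.append(palindrome)
--         palindrome = ''
--
--     return palindromes
-- ===== SOURCE B (Python) =====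
-- def _common_prefix_len(a, b):
--     r = 0
--     for x, y in zip(a, b):
--         if x != y:
--             break
--         r += 1
--     return r
--
--
-- def check_snakeeyes_palindrome(text):
--     results = []
--     for i in range(len(text) - 1):
--         pre = text[:i + 1][::-1]
--         suf = text[i + 1:]
--         r = _common_prefix_len(pre, suf)
--         if r:
--             results.append(pre[:r][::-1] + suf[:r])
--     return results
-- ===== Notes on version B (the rewrite author's own statement) =====
-- stated objective: alternative
-- what changed: Replaces the two-index while-loop that walks j down / k up while growing the palindrome string by char-by-char concatenation with, per gap center, slicing the reversed prefix and the suffix, taking their common-prefix length, and emitting the palindrome as one slice concatenation.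
import Mathlib
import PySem

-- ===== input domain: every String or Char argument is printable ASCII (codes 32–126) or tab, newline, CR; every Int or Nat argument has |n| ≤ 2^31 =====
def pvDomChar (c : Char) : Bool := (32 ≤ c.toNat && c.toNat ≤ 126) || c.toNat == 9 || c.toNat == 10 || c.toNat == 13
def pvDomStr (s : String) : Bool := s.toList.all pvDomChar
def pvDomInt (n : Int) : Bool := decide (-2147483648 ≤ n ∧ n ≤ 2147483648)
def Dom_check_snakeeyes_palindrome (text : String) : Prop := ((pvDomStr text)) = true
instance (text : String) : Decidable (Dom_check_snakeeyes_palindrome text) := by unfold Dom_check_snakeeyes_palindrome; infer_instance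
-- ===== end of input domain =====

set_option maxRecDepth 4000


-- B replaces A's two-index expansion loop with, per gap center, a common-prefix
-- length of the reversed prefix and the suffix, emitted as one slice concatenation
-- (objective: alternative decomposition).

-- ===== PORT A =====
-- A's inner while loop: walk j down and k up while text[j] == text[k],
-- growing the palindrome by prepending text[j] and appending text[k].
-- pyGetD is exact here: it is only reached when the guard proves 0 ≤ j < len and 0 ≤ k < len.
def pvExpand (s : List Char) (j k : Int) (pal : List Char) : List Char :=
  if h : 0 ≤ j ∧ k < (s.length : Int) ∧ PySem.List.pyGet? s j = PySem.List.pyGet? s k then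
    pvExpand s (j - 1) (k + 1)
      (PySem.List.pyGetD s j ' ' :: pal ++ [PySem.List.pyGetD s k ' '])
  else pal
termination_by ((s.length : Int) - k).toNat
decreasing_by omega

def check_snakeeyes_palindrome (text : String) : List String :=
  let s := text.toList
  let length := s.length
  let st := (PySem.List.enumerate s).foldl
    (fun (acc : List String × List Char) ie =>
      let pal := if ie.1 + 1 < (length : Int) then pvExpand s ie.1 (ie.1 + 1) acc.2 else acc.2
      let palindromes := if 0 < pal.length then acc.1 ++ [String.mk pal] else acc.1
      (palindromes, []))
    ([], [])
  st.1

-- ===== PORT B =====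
-- for x, y in zip(a, b): if x != y: break; r += 1   — ported as a fold with a 'broke' flag
def pvCommonPrefixLen (a b : List Char) : ℕ :=
  ((a.zip b).foldl
    (fun (st : Bool × ℕ) xy =>
      if st.1 then st else if xy.1 ≠ xy.2 then (true, st.2) else (false, st.2 + 1))
    (false, 0)).2

-- string slices with nonnegative bounds are exact as take/drop on toList
def check_snakeeyes_palindrome_alt (text : String) : List String :=
  let s := text.toList
  (List.range (s.length - 1)).foldl
    (fun acc i =>
      let pre := (s.take (i + 1)).reverse
      let suf := s.drop (i + 1)
      let r := pvCommonPrefixLen pre suf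
      if 0 < r then acc ++ [String.mk ((pre.take r).reverse ++ suf.take r)] else acc)
    []

-- ===== PRECONDITION & SPEC =====
def Spec_check_snakeeyes_palindrome (text : String) (out : List String) : Prop := out = check_snakeeyes_palindrome_alt text
instance (text : String) (out : List String) : Decidable (Spec_check_snakeeyes_palindrome text out) := by unfold Spec_check_snakeeyes_palindrome; infer_instance

-- ===== CLAIM (what is proved, stated in full; the proofs are below) =====
def Claim_equal_check_snakeeyes_palindrome : Prop := ∀ (text : String), Dom_check_snakeeyes_palindrome text → Spec_check_snakeeyes_palindrome text (check_snakeeyes_palindrome text)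

-- ===== LEMMAS AND PROOFS =====

-- reference common-prefix length, used only by the proofs
def lcp : List Char → List Char → ℕ
  | a :: as, b :: bs => if a = b then lcp as bs + 1 else 0
  | _, _ => 0

lemma lcp_nil_left (b : List Char) : lcp [] b = 0 := by cases b <;> rfl

lemma lcp_nil_right (a : List Char) : lcp a [] = 0 := by cases a <;> rfl

-- the step function of B's fold, named for the proofs (definitionally B's lambda)
def pvStep : Bool × ℕ → Char × Char → Bool × ℕ := fun st xy =>
  if st.1 then st else if xy.1 ≠ xy.2 then (true, st.2) else (false, st.2 + 1)

lemma foldl_broke (l : List (Char × Char)) (n : ℕ) :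
    l.foldl pvStep (true, n) = (true, n) := by
  induction l with
  | nil => rfl
  | cons x xs ih => simpa [pvStep] using ih

lemma pvCommonPrefixLen_aux (a b : List Char) (n : ℕ) :
    ((a.zip b).foldl pvStep (false, n)).2 = n + lcp a b := by
  induction a generalizing b n with
  | nil => simp [lcp_nil_left]
  | cons x xs ih =>
    cases b with
    | nil => simp [lcp_nil_right]
    | cons y ys =>
      by_cases h : x = y
      · subst h
        have hstep : pvStep (false, n) (x, x) = (false, n + 1) := by simp [pvStep]
        have hl : lcp (x :: xs) (x :: ys) = lcp xs ys + 1 := by simp [lcp]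
        simp only [List.zip_cons_cons, List.foldl_cons, hstep, ih, hl]
        omega
      · have hstep : pvStep (false, n) (x, y) = (true, n) := by simp [pvStep, h]
        simp [List.zip_cons_cons, hstep, foldl_broke, lcp, h]

lemma pvCommonPrefixLen_eq_lcp (a b : List Char) : pvCommonPrefixLen a b = lcp a b := by
  show ((a.zip b).foldl pvStep (false, 0)).2 = lcp a b
  simpa using pvCommonPrefixLen_aux a b 0

-- the reversed prefix ending at index j (empty when j < 0)
def pvPref (s : List Char) (j : Int) : List Char :=
  if 0 ≤ j then (s.take (j.toNat + 1)).reverse else []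

lemma pvPref_cons (s : List Char) (j : Int) (h0 : 0 ≤ j) (h1 : j < (s.length : Int)) :
    pvPref s j = s[j.toNat]'(by omega) :: pvPref s (j - 1) := by
  have hlt : j.toNat < s.length := by omega
  have htake : s.take (j.toNat + 1) = s.take j.toNat ++ [s[j.toNat]] := by
    rw [List.take_add_one, List.getElem?_eq_getElem hlt]; rfl
  by_cases hz : j = 0
  · subst hz
    simp only [Int.toNat_zero, List.take_zero, List.nil_append] at htake
    simp [pvPref, htake]
  · have h1' : (0:Int) ≤ j - 1 := by omega
    have h2' : (j - 1).toNat + 1 = j.toNat := by omega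
    simp only [pvPref, if_pos h0, if_pos h1', h2', htake]
    simp

lemma lcp_cons_cons (x y : Char) (a b : List Char) :
    lcp (x :: a) (y :: b) = if x = y then lcp a b + 1 else 0 := by
  simp [lcp]

lemma pvExpand_spec (s : List Char) : ∀ (j k : Int) (pal : List Char),
    0 ≤ k → j < (s.length : Int) →
    pvExpand s j k pal =
      ((pvPref s j).take (lcp (pvPref s j) (s.drop k.toNat))).reverse ++ pal
        ++ (s.drop k.toNat).take (lcp (pvPref s j) (s.drop k.toNat)) := by
  intro j k pal
  induction j, k, pal using pvExpand.induct (s := s) with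
  | case1 j k pal h ih =>
    intro hk hj
    obtain ⟨hj0, hkn, heq⟩ := h
    have hjn : j.toNat < s.length := by omega
    have hknn : k.toNat < s.length := by omega
    have hgj : PySem.List.pyGet? s j = some (s[j.toNat]'hjn) :=
      PySem.List.pyGet?_eq_some_getElem s hj0 hj
    have hgk : PySem.List.pyGet? s k = some (s[k.toNat]'hknn) :=
      PySem.List.pyGet?_eq_some_getElem s hk hkn
    have hch : s[j.toNat]'hjn = s[k.toNat]'hknn := by
      have := heq; rw [hgj, hgk] at this; exact Option.some.inj this
    have hu : pvPref s j = s[j.toNat]'hjn :: pvPref s (j - 1) := pvPref_cons s j hj0 hj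
    have hv : s.drop k.toNat = s[k.toNat]'hknn :: s.drop (k.toNat + 1) :=
      List.drop_eq_getElem_cons hknn
    have hk1 : (k + 1).toNat = k.toNat + 1 := by omega
    have hdj : PySem.List.pyGetD s j ' ' = s[j.toNat]'hjn :=
      PySem.List.pyGetD_eq_getElem s ' ' hj0 hj
    have hdk : PySem.List.pyGetD s k ' ' = s[k.toNat]'hknn :=
      PySem.List.pyGetD_eq_getElem s ' ' hk hkn
    have step : pvExpand s j k pal =
        pvExpand s (j - 1) (k + 1)
          (PySem.List.pyGetD s j ' ' :: pal ++ [PySem.List.pyGetD s k ' ']) := by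
      rw [pvExpand]; rw [dif_pos ⟨hj0, hkn, heq⟩]
    rw [step, ih (by omega) (by omega)]
    rw [hk1, hu, hv, hdj, hdk, lcp_cons_cons, if_pos hch]
    simp [hch]
    rw [hv, List.take_succ_cons]
  | case2 j k pal h =>
    intro hk hj
    have hstop : pvExpand s j k pal = pal := by
      rw [pvExpand]; rw [dif_neg h]
    have hzero : lcp (pvPref s j) (s.drop k.toNat) = 0 := by
      by_cases hj0 : 0 ≤ j
      · by_cases hkn : k < (s.length : Int)
        · have hjn : j.toNat < s.length := by omega
          have hknn : k.toNat < s.length := by omega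
          have hne : PySem.List.pyGet? s j ≠ PySem.List.pyGet? s k := by
            intro hcon; exact h ⟨hj0, hkn, hcon⟩
          have hgj := PySem.List.pyGet?_eq_some_getElem s hj0 hj
          have hgk := PySem.List.pyGet?_eq_some_getElem s hk hkn
          have hchne : s[j.toNat]'hjn ≠ s[k.toNat]'hknn := by
            intro hcc; apply hne; rw [hgj, hgk, hcc]
          rw [pvPref_cons s j hj0 hj, List.drop_eq_getElem_cons hknn,
            lcp_cons_cons, if_neg hchne]
        · have : s.length ≤ k.toNat := by omega
          rw [List.drop_eq_nil_of_le this, lcp_nil_right]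
      · have : pvPref s j = [] := by simp [pvPref, hj0]
        rw [this, lcp_nil_left]
    rw [hstop, hzero]
    simp

-- per-center output of A (as an Option), phrased through pvExpand
def pvCenter (s : List Char) (i : ℕ) : Option String :=
  if (i : Int) + 1 < (s.length : Int) then
    let pal := pvExpand s i ((i : Int) + 1) []
    if 0 < pal.length then some (String.mk pal) else none
  else none

-- the loop body of port A, named for the proofs (definitionally A's lambda)
def pvBodyA (s : List Char) (acc : List String × List Char) (ie : Int × Char) :
    List String × List Char :=
  let pal := if ie.1 + 1 < (s.length : Int) then pvExpand s ie.1 (ie.1 + 1) acc.2 else acc.2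
  let palindromes := if 0 < pal.length then acc.1 ++ [String.mk pal] else acc.1
  (palindromes, [])

lemma pvBodyA_eq (s : List Char) (acc : List String) (i : Int) (c : Char) (hi : 0 ≤ i) :
    pvBodyA s (acc, []) (i, c) = (acc ++ (pvCenter s i.toNat).toList, []) := by
  have hcast : ((i.toNat : Int)) = i := Int.toNat_of_nonneg hi
  simp only [pvBodyA, pvCenter, hcast]
  by_cases hlt : i + 1 < (s.length : Int)
  · simp only [if_pos hlt]
    by_cases hp : 0 < (pvExpand s i (i + 1) ([] : List Char)).length
    · simp [hp]
    · simp [hp]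
  · simp [hlt]

lemma foldA_spec (s : List Char) : ∀ (l : List (Int × Char)) (acc : List String),
    (∀ p ∈ l, 0 ≤ p.1) →
    ((l.foldl (pvBodyA s) (acc, [])).1)
      = acc ++ l.filterMap (fun ie => pvCenter s ie.1.toNat) := by
  intro l
  induction l with
  | nil => intro acc _; simp
  | cons p t ih =>
    intro acc h
    obtain ⟨i, c⟩ := p
    have hi : 0 ≤ i := h (i, c) (by simp)
    rw [List.foldl_cons, pvBodyA_eq s acc i c hi,
      ih _ (fun q hq => h q (List.mem_cons_of_mem _ hq))]
    cases hcen : pvCenter s i.toNat <;> simp [hcen]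

-- per-center output of B, and B's loop body (definitionally B's lambda)
def pvItemB (s : List Char) (i : ℕ) : Option String :=
  let pre := (s.take (i + 1)).reverse
  let suf := s.drop (i + 1)
  let r := pvCommonPrefixLen pre suf
  if 0 < r then some (String.mk ((pre.take r).reverse ++ suf.take r)) else none

def pvBodyB (s : List Char) (acc : List String) (i : ℕ) : List String :=
  let pre := (s.take (i + 1)).reverse
  let suf := s.drop (i + 1)
  let r := pvCommonPrefixLen pre suf
  if 0 < r then acc ++ [String.mk ((pre.take r).reverse ++ suf.take r)] else acc

lemma foldB_spec (s : List Char) : ∀ (l : List ℕ) (acc : List String),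
    l.foldl (pvBodyB s) acc = acc ++ l.filterMap (pvItemB s) := by
  intro l
  induction l with
  | nil => intro acc; simp
  | cons i t ih =>
    intro acc
    rw [List.foldl_cons]
    by_cases hr : 0 < pvCommonPrefixLen ((s.take (i + 1)).reverse) (s.drop (i + 1))
    · simp only [pvBodyB, pvItemB, if_pos hr, ih, List.filterMap_cons]
      simp
    · simp only [pvBodyB, pvItemB, if_neg hr, ih, List.filterMap_cons]

lemma lcp_le_left : ∀ (a b : List Char), lcp a b ≤ a.length := by
  intro a
  induction a with
  | nil => intro b; simp [lcp_nil_left]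
  | cons x xs ih =>
    intro b
    cases b with
    | nil => simp [lcp_nil_right]
    | cons y ys =>
      rw [lcp_cons_cons]
      by_cases h : x = y
      · simp only [if_pos h, List.length_cons]
        exact Nat.succ_le_succ (ih ys)
      · simp [h]

lemma center_eq_item (s : List Char) (i : ℕ) (h : i + 1 < s.length) :
    pvCenter s i = pvItemB s i := by
  have hlt : (i : Int) + 1 < (s.length : Int) := by exact_mod_cast h
  have hsp := pvExpand_spec s i ((i : Int) + 1) [] (by omega) (by omega)
  have hpref : pvPref s (i : Int) = (s.take (i + 1)).reverse := by
    simp [pvPref]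
  have hknat : ((i : Int) + 1).toNat = i + 1 := by omega
  rw [hpref, hknat] at hsp
  have hlcp := pvCommonPrefixLen_eq_lcp ((s.take (i + 1)).reverse) (s.drop (i + 1))
  have hle := lcp_le_left ((s.take (i + 1)).reverse) (s.drop (i + 1))
  simp only [pvCenter, pvItemB, if_pos hlt, hsp, hlcp]
  set pre := (s.take (i + 1)).reverse with hpre
  set suf := s.drop (i + 1) with hsuf
  set r := lcp pre suf with hrdef
  have hlen : ((pre.take r).reverse ++ [] ++ suf.take r).length
      = r + min r suf.length := by
    simp [List.length_take, Nat.min_eq_left (by simpa using hle)]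
  by_cases hr : 0 < r
  · rw [if_pos (by omega), if_pos hr]
    simp
  · rw [if_neg (by omega), if_neg hr]

lemma filterMap_range_eq (s : List Char) :
    (List.range s.length).filterMap (fun i => pvCenter s i)
      = (List.range (s.length - 1)).filterMap (pvItemB s) := by
  cases hn : s.length with
  | zero => simp
  | succ m =>
    rw [List.range_succ, List.filterMap_append]
    have hlast : pvCenter s m = none := by
      have : ¬ ((m : Int) + 1 < (s.length : Int)) := by omega
      simp [pvCenter, this]
    simp only [List.filterMap_cons, hlast, List.filterMap_nil, List.append_nil,
      Nat.succ_sub_one]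
    exact List.filterMap_congr (fun i hi => center_eq_item s i
      (by have := List.mem_range.mp hi; omega))

-- ===== VERDICT (by name: the statement is the Claim_ definition above) =====
theorem check_snakeeyes_palindrome_spec : Claim_equal_check_snakeeyes_palindrome := by
  intro text _
  unfold Spec_check_snakeeyes_palindrome
  have hA : check_snakeeyes_palindrome text
      = ((PySem.List.enumerate text.toList).foldl (pvBodyA text.toList) ([], [])).1 := rfl
  have hB : check_snakeeyes_palindrome_alt text
      = (List.range (text.toList.length - 1)).foldl (pvBodyB text.toList) [] := rfl
  have hpos : ∀ p ∈ PySem.List.enumerate text.toList, (0:Int) ≤ p.1 := by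
    intro p hp
    obtain ⟨k, hk, rfl⟩ := (PySem.List.mem_enumerate_iff _ _ _).mp hp
    simp
  rw [hA, foldA_spec _ _ _ hpos, hB, foldB_spec]
  rw [PySem.List.enumerate_eq_map_pyRange text.toList ' ', List.filterMap_map]
  have hlen : PySem.List.len text.toList = ((text.toList.length : ℕ) : Int) := by
    simp
  rw [hlen, PySem.List.pyRange_zero_natCast, List.filterMap_map]
  have hfun : ∀ i : ℕ, (((fun ie => pvCenter text.toList ie.1.toNat)
        ∘ fun j => ((j : Int), PySem.List.pyGetD text.toList j ' ')) ∘ fun k : ℕ => (k : Int)) i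
      = pvCenter text.toList i := by
    intro i; simp [Function.comp]
  rw [List.filterMap_congr (fun i _ => hfun i), filterMap_range_eq]
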